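-- pv_equiv track=rewrite | github.com/Imacx-maria/master-collection | SKILLS/webflow-pretreat/scripts/content_fidelity_probe.py | _strip_common_top_folder
-- ===== SOURCE A (Python) =====
-- def _strip_common_top_folder(paths: dict[str, str]) -> dict[str, str]:
--     """If every path shares the same top-level folder, strip it.
--
--     Webflow export ZIPs sometimes wrap content in `<site-slug>/`; the matching
--     extracted folder is usually flattened. Without this, a clean output would
--     be flagged as 'all files missing + all files added'.
--     """
--     if not paths:
--         return paths
--     tops = {p.split("/", 1)[0] for p in paths if "/" in p}
--     has_root_files = any("/" not in p for p in paths)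
--     if has_root_files or len(tops) != 1:
--         return paths
--     top = next(iter(tops)) + "/"
--     return {p[len(top):]: html for p, html in paths.items() if p.startswith(top)}
-- ===== SOURCE B (Python) =====
-- def _strip_common_top_folder(paths: dict[str, str]) -> dict[str, str]:
--     """Single-pass variant: find the shared top folder (or bail out) in one scan."""
--     if not paths:
--         return paths
--     top = None
--     for p in paths:
--         if "/" not in p:
--             return paths
--         head = p.split("/", 1)[0]
--         if top is None:
--             top = head
--         elif head != top:
--             return paths
--     n = len(top) + 1
--     return {p[n:]: html for p, html in paths.items()}
-- ===== Notes on version B (the rewrite author's own statement) =====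
-- stated objective: simpler
-- what changed: Replaces the set-of-tops plus separate any()-scan plus filtered comprehension with a single early-exit scan that tracks one candidate top folder (None sentinel), then an unconditional strip of len(top)+1 characters.
import Mathlib
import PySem

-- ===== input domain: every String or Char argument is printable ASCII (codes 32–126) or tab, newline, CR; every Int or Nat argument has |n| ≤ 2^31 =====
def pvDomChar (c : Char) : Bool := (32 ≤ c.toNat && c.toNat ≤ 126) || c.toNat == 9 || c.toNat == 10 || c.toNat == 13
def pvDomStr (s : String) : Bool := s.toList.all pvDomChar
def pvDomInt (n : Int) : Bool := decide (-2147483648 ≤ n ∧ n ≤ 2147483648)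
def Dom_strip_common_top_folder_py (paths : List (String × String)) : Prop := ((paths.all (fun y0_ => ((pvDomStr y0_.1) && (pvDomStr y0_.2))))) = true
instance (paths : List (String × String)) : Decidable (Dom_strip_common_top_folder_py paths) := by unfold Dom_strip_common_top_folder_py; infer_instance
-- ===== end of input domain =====

-- One honest line: B replaces A's tops-set + any() root-file scan + filtered comprehension
-- by one early-exit scan keeping a single Option-al top folder; return value only, no mutation.

-- shared helper: p.split("/", 1)[0]
def pvHeadTop (p : String) : String :=
  ((PySem.Str.splitMax? p "/" 1).getD []).headD ""

-- ===== PORT A =====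
def strip_common_top_folder_py (paths : List (String × String)) : List (String × String) :=
  if paths = [] then paths
  else
    let tops : PySem.Set String :=
      paths.foldl (fun s kv =>
        if PySem.Str.isIn "/" kv.1 then PySem.Set.add s (pvHeadTop kv.1) else s) PySem.Set.empty
    let has_root_files : Bool := paths.any (fun kv => !(PySem.Str.isIn "/" kv.1))
    if has_root_files || PySem.Set.len tops ≠ 1 then paths
    else
      let top := tops.headD "" ++ "/"
      (paths.foldl (fun d kv =>
        if PySem.Str.startswith kv.1 top then
          PySem.Dict.insert d (PySem.Str.slice kv.1 (some (PySem.Str.len top)) none) kv.2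
        else d) (PySem.Dict.mk [])).items

-- ===== PORT B =====
-- the for-loop of Source B: `none` = the loop hit `return paths`, `some t` = loop finished with top = t
def pvScanTop : List (String × String) → Option String → Option String
  | [], top => top
  | kv :: rest, top =>
    if !(PySem.Str.isIn "/" kv.1) then none
    else
      let head := pvHeadTop kv.1
      match top with
      | none => pvScanTop rest (some head)
      | some t => if head ≠ t then none else pvScanTop rest (some t)

def strip_common_top_folder_py_alt (paths : List (String × String)) : List (String × String) :=
  if paths = [] then paths
  else
    match pvScanTop paths none with
    | none => paths
    | some t =>
      let n : Int := PySem.Str.len t + 1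
      (paths.foldl (fun d kv =>
        PySem.Dict.insert d (PySem.Str.slice kv.1 (some n) none) kv.2) (PySem.Dict.mk [])).items

-- ===== PRECONDITION & SPEC =====
def Spec_strip_common_top_folder_py (paths : List (String × String)) (out : List (String × String)) : Prop := out = strip_common_top_folder_py_alt paths
instance (paths : List (String × String)) (out : List (String × String)) : Decidable (Spec_strip_common_top_folder_py paths out) := by unfold Spec_strip_common_top_folder_py; infer_instance

-- ===== CLAIM (what is proved, stated in full; the proofs are below) =====
def Claim_equal_strip_common_top_folder_py : Prop := ∀ (paths : List (String × String)), Dom_strip_common_top_folder_py paths → Spec_strip_common_top_folder_py paths (strip_common_top_folder_py paths)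

-- ===== LEMMAS AND PROOFS =====

-- go with maxsplit 0 returns the rest of the string as the single remaining piece
theorem pvGoZero (sep : List Char) (fuel : Nat) (l : List Char) (acc : List (List Char)) :
    PySem.Chars.splitOnMax.go sep fuel 0 l [] acc = (l :: acc).reverse := by
  rw [PySem.Chars.splitOnMax.go.eq_def]
  cases fuel <;> cases l <;> simp

-- go with maxsplit 1 splits off the part before the first '/'
theorem pvGoOne (l : List Char) : ∀ (fuel : Nat) (cur : List Char) (acc : List (List Char)),
    l.length < fuel →
    PySem.Chars.splitOnMax.go ['/'] fuel 1 l cur acc =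
      if '/' ∈ l then
        acc.reverse ++ [cur.reverse ++ l.takeWhile (· ≠ '/'), (l.dropWhile (· ≠ '/')).tail]
      else ((cur.reverse ++ l) :: acc).reverse := by
  induction l with
  | nil =>
    intro fuel cur acc h
    rw [PySem.Chars.splitOnMax.go.eq_def]
    cases fuel <;> simp
  | cons c rest ih =>
    intro fuel cur acc h
    match fuel, h with
    | fuel + 1, h =>
      rw [PySem.Chars.splitOnMax.go.eq_def]
      by_cases hc : c = '/'
      · subst hc
        have hpre : List.isPrefixOf ['/'] ('/' :: rest) = true := by
          simp [List.isPrefixOf]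
        simp [hpre, pvGoZero, List.takeWhile_cons, List.dropWhile_cons]
      · have hpre : List.isPrefixOf ['/'] (c :: rest) = false := by
          simp only [List.isPrefixOf, Bool.and_eq_true, beq_iff_eq, List.isPrefixOf_nil_left,
            and_true, Bool.eq_false_iff, ne_eq]
          exact fun h' => hc h'.symm
        have hlen : rest.length < fuel := by simpa using Nat.lt_of_succ_lt_succ h
        simp only [hpre, if_neg (by omega : ¬ (Nat.succ 0 = 0))]
        rw [ih fuel (c :: cur) acc hlen]
        by_cases hm : '/' ∈ rest
        · simp [hm, hc, List.takeWhile_cons, List.dropWhile_cons]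
        · have : ¬ '/' ∈ (c :: rest) := by
            simp only [List.mem_cons, not_or]
            exact ⟨fun h' => hc h'.symm, hm⟩
          simp [hm, this, List.takeWhile_cons, hc]

-- the head piece of p.split("/", 1) is everything before the first '/'
theorem pvHeadTop_eq (p : String) :
    pvHeadTop p = String.ofList (p.toList.takeWhile (· ≠ '/')) := by
  unfold pvHeadTop PySem.Str.splitMax? PySem.Chars.splitMax?
  have hsep : ("/" : String).toList = ['/'] := rfl
  rw [hsep]
  unfold PySem.Chars.splitOnMax
  rw [if_neg (by simp), if_neg (by norm_num)]
  have h1 : Int.toNat 1 = 1 := rfl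
  rw [h1, pvGoOne p.toList (p.toList.length + 1) [] [] (by omega)]
  by_cases h : '/' ∈ p.toList
  · simp [h]
  · have ht : List.takeWhile (fun x => !decide (x = '/')) p.toList = p.toList := by
      apply List.takeWhile_eq_self_iff.mpr
      intro x hx
      simp only [Bool.not_eq_true', decide_eq_false_iff_not]
      rintro rfl; exact h hx
    simp [h, ht]

-- a key containing '/' decomposes as head ++ '/' ++ tail
theorem pvKeySplit (p : String) (h : PySem.Str.isIn "/" p = true) :
    p.toList = p.toList.takeWhile (· ≠ '/') ++ '/' :: (p.toList.dropWhile (· ≠ '/')).tail := by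
  have hmem : '/' ∈ p.toList := by
    have hinf := (PySem.Str.isIn_iff_infix "/" p).mp h
    have : ('/' : Char) ∈ ("/" : String).toList := by decide
    exact hinf.subset this
  have hd : p.toList.dropWhile (· ≠ '/') ≠ [] := by
    intro h0
    have := List.dropWhile_eq_nil_iff.mp h0 '/' hmem
    simp at this
  have hhead : (p.toList.dropWhile (· ≠ '/')).head hd = '/' := by
    have := List.head_dropWhile_not (fun c => decide (c ≠ '/')) hd
    simpa using this
  conv_lhs => rw [← List.takeWhile_append_dropWhile (p := fun c => decide (c ≠ '/')) (l := p.toList)]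
  rw [← List.cons_head_tail hd, hhead]
  simp

-- each key with a '/' starts with its own top folder plus '/'
theorem pvStartswith (p : String) (h : PySem.Str.isIn "/" p = true) :
    PySem.Str.startswith p (pvHeadTop p ++ "/") = true := by
  rw [PySem.Str.startswith_eq, PySem.Chars.startswith_iff, String.toList_append, pvHeadTop_eq]
  have hsep : ("/" : String).toList = ['/'] := rfl
  rw [hsep]
  simp only [String.toList_ofList]
  refine ⟨(p.toList.dropWhile (· ≠ '/')).tail, ?_⟩
  conv_rhs => rw [pvKeySplit p h]
  simp

theorem pvLenSlash (t : String) : PySem.Str.len (t ++ "/") = PySem.Str.len t + 1 := by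
  rw [PySem.Str.len_append]; rfl

-- characterisation of B's scanning loop
theorem pvScan_cons_some (kv : String × String) (rest : List (String × String)) (t : String) :
    pvScanTop (kv :: rest) (some t) =
      if PySem.Str.isIn "/" kv.1 = true then
        (if pvHeadTop kv.1 = t then pvScanTop rest (some t) else none)
      else none := by
  cases hin : PySem.Chars.isIn ['/'] kv.1.toList <;>
    by_cases hh : pvHeadTop kv.1 = t <;>
      simp [pvScanTop, PySem.Str.isIn_eq, hin, hh]

theorem pvScan_cons_none (kv : String × String) (rest : List (String × String)) :
    pvScanTop (kv :: rest) none =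
      if PySem.Str.isIn "/" kv.1 = true then pvScanTop rest (some (pvHeadTop kv.1))
      else none := by
  cases hin : PySem.Chars.isIn ['/'] kv.1.toList <;>
    simp [pvScanTop, PySem.Str.isIn_eq, hin]

theorem pvScan_some_iff (l : List (String × String)) : ∀ (t t' : String),
    pvScanTop l (some t) = some t' ↔
      (t' = t ∧ ∀ kv ∈ l, PySem.Str.isIn "/" kv.1 = true ∧ pvHeadTop kv.1 = t) := by
  induction l with
  | nil =>
    intro t t'
    simp only [pvScanTop, Option.some.injEq, List.not_mem_nil, false_implies, implies_true,
      and_true]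
    exact eq_comm
  | cons kv rest ih =>
    intro t t'
    rw [pvScan_cons_some]
    by_cases hin : PySem.Str.isIn "/" kv.1 = true
    · by_cases hh : pvHeadTop kv.1 = t
      · rw [if_pos hin, if_pos hh, ih]
        constructor
        · rintro ⟨rfl, hall⟩
          refine ⟨rfl, ?_⟩
          intro x hx
          rcases List.mem_cons.mp hx with rfl | hx'
          · exact ⟨hin, hh⟩
          · exact hall x hx'
        · rintro ⟨rfl, hall⟩
          exact ⟨rfl, fun x hx => hall x (List.mem_cons_of_mem _ hx)⟩
      · rw [if_pos hin, if_neg hh]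
        constructor
        · intro hcon; exact absurd hcon (by simp)
        · rintro ⟨rfl, hall⟩
          exact absurd (hall kv (by simp)).2 hh
    · rw [if_neg hin]
      constructor
      · intro hcon; exact absurd hcon (by simp)
      · rintro ⟨rfl, hall⟩
        exact absurd (hall kv (by simp)).1 hin

theorem pvScan_opt (l : List (String × String)) : ∀ (t : String),
    pvScanTop l (some t) = none ∨ pvScanTop l (some t) = some t := by
  induction l with
  | nil => intro t; right; rfl
  | cons kv rest ih =>
    intro t
    rw [pvScan_cons_some]
    split_ifs
    · exact ih t
    · left; rfl
    · left; rfl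

theorem pvFoldlAddConst (t : String) (xs : List String) (h : ∀ y ∈ xs, y = t) :
    List.foldl PySem.Set.add [t] xs = [t] := by
  induction xs with
  | nil => rfl
  | cons y rest ih =>
    have hy : y = t := h y (by simp)
    subst hy
    have hstep : PySem.Set.add [y] y = [y] := by
      unfold PySem.Set.add PySem.Set.contains
      simp
    simp only [List.foldl_cons, hstep]
    exact ih (fun z hz => h z (by simp [hz]))



theorem pvAddNil (x : String) : PySem.Set.add ([] : PySem.Set String) x = [x] := by
  unfold PySem.Set.add PySem.Set.contains
  simp

theorem pvTopsEq (L : List (String × String)) (hAll : ∀ kv ∈ L, PySem.Str.isIn "/" kv.1 = true) :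
    List.foldl (fun s kv => if PySem.Str.isIn "/" kv.1 then PySem.Set.add s (pvHeadTop kv.1) else s)
      PySem.Set.empty L
    = PySem.Set.ofList (L.map fun kv => pvHeadTop kv.1) := by
  rw [PySem.Set.ofList_eq_foldl, List.foldl_map]
  exact PySem.List.foldl_congr_mem L _ _ _ (fun acc x hx => by rw [if_pos (hAll x hx)])

theorem pvFoldsEq (L : List (String × String)) (t : String)
    (hAll : ∀ kv ∈ L, PySem.Str.isIn "/" kv.1 = true)
    (hEq : ∀ kv ∈ L, pvHeadTop kv.1 = t) :
    List.foldl (fun d kv =>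
        if PySem.Str.startswith kv.1 (t ++ "/") then
          PySem.Dict.insert d (PySem.Str.slice kv.1 (some (PySem.Str.len (t ++ "/"))) none) kv.2
        else d) (PySem.Dict.mk []) L =
    List.foldl (fun d kv =>
        PySem.Dict.insert d (PySem.Str.slice kv.1 (some (PySem.Str.len t + 1)) none) kv.2)
      (PySem.Dict.mk []) L := by
  apply PySem.List.foldl_congr_mem
  intro acc x hx
  have hsw := pvStartswith x.1 (hAll x hx)
  rw [hEq x hx] at hsw
  rw [if_pos hsw, pvLenSlash]

theorem pvPortsEq (paths : List (String × String)) :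
    strip_common_top_folder_py paths = strip_common_top_folder_py_alt paths := by
  cases paths with
  | nil => rfl
  | cons kv0 rest =>
    have hne : kv0 :: rest ≠ [] := by simp
    by_cases hAll : ∀ kv ∈ kv0 :: rest, PySem.Str.isIn "/" kv.1 = true
    · have hin0 : PySem.Str.isIn "/" kv0.1 = true := hAll kv0 (by simp)
      have hroot : ((kv0 :: rest).any fun kv => !(PySem.Str.isIn "/" kv.1)) = false := by
        rw [List.any_eq_false]
        intro x hx
        rw [hAll x hx]
        decide
      by_cases hEq : ∀ kv ∈ kv0 :: rest, pvHeadTop kv.1 = pvHeadTop kv0.1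
      · -- the strip case: both sides drop the shared top folder
        have hscan : pvScanTop (kv0 :: rest) none = some (pvHeadTop kv0.1) := by
          rw [pvScan_cons_none, if_pos hin0]
          exact (pvScan_some_iff rest _ _).mpr
            ⟨rfl, fun kv hk => ⟨hAll kv (by simp [hk]), hEq kv (by simp [hk])⟩⟩
        have htops :
            List.foldl (fun s kv => if PySem.Str.isIn "/" kv.1 then PySem.Set.add s (pvHeadTop kv.1) else s)
              PySem.Set.empty (kv0 :: rest) = [pvHeadTop kv0.1] := by
          rw [pvTopsEq _ hAll, PySem.Set.ofList_eq_foldl, List.map_cons, List.foldl_cons, pvAddNil]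
          exact pvFoldlAddConst _ _ (fun y hy => by
            rcases List.mem_map.mp hy with ⟨kv, hk, rfl⟩
            exact hEq kv (by simp [hk]))
        simp only [strip_common_top_folder_py, strip_common_top_folder_py_alt]
        rw [if_neg hne, if_neg hne, hscan, htops, hroot]
        rw [if_neg (by norm_num [PySem.Set.len])]
        exact congrArg PySem.Dict.items (pvFoldsEq (kv0 :: rest) (pvHeadTop kv0.1) hAll hEq)
      · -- some key has a different top folder: both sides return the input
        push Not at hEq
        obtain ⟨kvb, hkb, hbad⟩ := hEq
        have hscan : pvScanTop (kv0 :: rest) none = none := by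
          rw [pvScan_cons_none, if_pos hin0]
          rcases pvScan_opt rest (pvHeadTop kv0.1) with h | h
          · exact h
          · exfalso
            have hall := ((pvScan_some_iff rest _ _).mp h).2
            rcases List.mem_cons.mp hkb with rfl | hkb'
            · exact hbad rfl
            · exact hbad (hall kvb hkb').2
        have hlen :
            PySem.Set.len (List.foldl
              (fun s kv => if PySem.Str.isIn "/" kv.1 then PySem.Set.add s (pvHeadTop kv.1) else s)
              PySem.Set.empty (kv0 :: rest)) ≠ 1 := by
          rw [pvTopsEq _ hAll]
          intro hlen1
          have hlen1' : (PySem.Set.ofList ((kv0 :: rest).map fun kv => pvHeadTop kv.1)).length = 1 := by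
            unfold PySem.Set.len at hlen1
            exact_mod_cast hlen1
          obtain ⟨u, hu⟩ := List.length_eq_one_iff.mp hlen1'
          have h0mem : pvHeadTop kv0.1 ∈ PySem.Set.ofList ((kv0 :: rest).map fun kv => pvHeadTop kv.1) :=
            (PySem.Set.mem_ofList _ _).mpr (List.mem_map_of_mem (by simp))
          have hbmem : pvHeadTop kvb.1 ∈ PySem.Set.ofList ((kv0 :: rest).map fun kv => pvHeadTop kv.1) :=
            (PySem.Set.mem_ofList _ _).mpr (List.mem_map_of_mem hkb)
          rw [hu] at h0mem hbmem
          simp only [List.mem_singleton] at h0mem hbmem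
          exact hbad (hbmem.trans h0mem.symm)
        simp only [strip_common_top_folder_py, strip_common_top_folder_py_alt]
        rw [if_neg hne, if_neg hne, hscan, hroot]
        rw [if_pos (by rw [decide_eq_true hlen]; rfl)]
    · -- a root-level file exists: both sides return the input
      push Not at hAll
      obtain ⟨kvb, hkb, hbadIn⟩ := hAll
      have hb : PySem.Str.isIn "/" kvb.1 = false := by
        simpa [Bool.not_eq_true] using hbadIn
      have hb' : PySem.Chars.isIn ['/'] kvb.1.toList = false := by
        rw [← show ("/" : String).toList = ['/'] from rfl, ← PySem.Str.isIn_eq]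
        exact hb
      have hroot : ((kv0 :: rest).any fun kv => !(PySem.Str.isIn "/" kv.1)) = true :=
        List.any_eq_true.mpr ⟨kvb, hkb, by simp [hb']⟩
      have hscan : pvScanTop (kv0 :: rest) none = none := by
        rw [pvScan_cons_none]
        rcases List.mem_cons.mp hkb with rfl | hkb'
        · rw [if_neg (by simp [hb'])]
        · by_cases hin0 : PySem.Str.isIn "/" kv0.1 = true
          · rw [if_pos hin0]
            rcases pvScan_opt rest (pvHeadTop kv0.1) with h | h
            · exact h
            · exfalso
              have := (((pvScan_some_iff rest _ _).mp h).2 kvb hkb').1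
              rw [hb] at this
              exact Bool.false_ne_true this
          · rw [if_neg hin0]
      simp only [strip_common_top_folder_py, strip_common_top_folder_py_alt]
      rw [if_neg hne, if_neg hne, hscan, hroot]
      rfl

-- ===== VERDICT (by name: the statement is the Claim_ definition above) =====
theorem strip_common_top_folder_py_spec : Claim_equal_strip_common_top_folder_py := by
  intro paths _
  unfold Spec_strip_common_top_folder_py
  exact pvPortsEq paths
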